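-- pv_equiv track=rewrite | github.com/OneofGods/Loly | la_liga_real_algorithm.py | _get_stronger_real_la_liga_team
-- ===== SOURCE A (Python) =====
-- def _get_stronger_real_la_liga_team(home_team: str, away_team: str) -> str:
--     """Determine stronger team based on REAL La Liga hierarchy (2015-2025)"""
--     # Based on actual recent dominance and financial power data
--     barca_tier = ['BARCELONA', 'BARCA', 'FC BARCELONA']  # Recent dominance since 2003
--     real_tier = ['REAL MADRID', 'MADRID', 'REAL']       # Financial power + historical
--     elite_tier = ['ATLETICO MADRID']                     # Consistent top 3
--     strong_tier = ['SEVILLA', 'ATHLETIC BILBAO', 'REAL SOCIEDAD', 'VILLARREAL']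
--
--     home_barca = any(team in home_team.upper() for team in barca_tier)
--     away_barca = any(team in away_team.upper() for team in barca_tier)
--     home_real = any(team in home_team.upper() for team in real_tier)
--     away_real = any(team in away_team.upper() for team in real_tier)
--     home_elite = any(team in home_team.upper() for team in elite_tier)
--     away_elite = any(team in away_team.upper() for team in elite_tier)
--     home_strong = any(team in home_team.upper() for team in strong_tier)
--     away_strong = any(team in away_team.upper() for team in strong_tier)
--
--     # Barcelona recent dominance (47.2% vs 36.1% since 2003)
--     if home_barca and not (away_barca or away_real):
--         return home_team
--     elif away_barca and not (home_barca or home_real):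
--         return away_team
--     # Real Madrid financial power
--     elif home_real and not (away_barca or away_real):
--         return home_team
--     elif away_real and not (home_barca or home_real):
--         return away_team
--     # Elite teams
--     elif home_elite and not (away_elite or away_barca or away_real):
--         return home_team
--     elif away_elite and not (home_elite or home_barca or home_real):
--         return away_team
--     # Strong teams
--     elif home_strong and not (away_strong or away_elite or away_barca or away_real):
--         return home_team
--     elif away_strong and not (home_strong or home_elite or home_barca or home_real):
--         return away_team
--     else:
--         # Similar level - Spanish home advantage (possession-based)
--         return home_team
-- ===== SOURCE B (Python) =====
-- def _get_stronger_real_la_liga_team(home_team: str, away_team: str) -> str: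
--     """Determine stronger team based on REAL La Liga hierarchy (2015-2025)"""
--     tiers = [
--         ['BARCELONA', 'BARCA', 'FC BARCELONA', 'REAL MADRID', 'MADRID', 'REAL'],
--         ['ATLETICO MADRID'],
--         ['SEVILLA', 'ATHLETIC BILBAO', 'REAL SOCIEDAD', 'VILLARREAL'],
--     ]
--
--     def rank(team: str) -> int:
--         name = team.upper()
--         for i, tier in enumerate(tiers):
--             if any(t in name for t in tier):
--                 return i
--         return len(tiers)
--
--     # strictly stronger away team wins; ties keep Spanish home advantage
--     return away_team if rank(away_team) < rank(home_team) else home_team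
-- ===== Notes on version B (the rewrite author's own statement) =====
-- stated objective: simpler
-- what changed: Replaces the flat 8-branch joint decision tree over 8 precomputed flags by a per-team tier-rank function (barca and real collapsed into one top tier) followed by a single strict comparison that gives ties to the home team.
import Mathlib
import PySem

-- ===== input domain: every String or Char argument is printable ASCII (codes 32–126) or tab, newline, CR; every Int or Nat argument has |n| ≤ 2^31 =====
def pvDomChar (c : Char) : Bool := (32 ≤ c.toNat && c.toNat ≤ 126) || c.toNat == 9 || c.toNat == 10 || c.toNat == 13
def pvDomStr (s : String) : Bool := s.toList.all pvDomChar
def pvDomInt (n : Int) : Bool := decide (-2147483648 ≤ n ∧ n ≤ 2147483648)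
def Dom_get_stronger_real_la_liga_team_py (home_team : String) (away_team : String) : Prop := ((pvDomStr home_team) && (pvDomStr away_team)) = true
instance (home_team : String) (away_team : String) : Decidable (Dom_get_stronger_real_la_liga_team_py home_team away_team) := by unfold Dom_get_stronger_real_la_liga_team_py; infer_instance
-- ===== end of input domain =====

-- B replaces A's flat 8-branch joint decision tree by a per-team tier rank plus one strict comparison (objective: simpler).


-- ===== PORT A =====
def get_stronger_real_la_liga_team_py (home_team : String) (away_team : String) : String :=
  let barca_tier : List String := ["BARCELONA", "BARCA", "FC BARCELONA"]
  let real_tier : List String := ["REAL MADRID", "MADRID", "REAL"]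
  let elite_tier : List String := ["ATLETICO MADRID"]
  let strong_tier : List String := ["SEVILLA", "ATHLETIC BILBAO", "REAL SOCIEDAD", "VILLARREAL"]
  let home_barca := barca_tier.any (fun team => PySem.Str.isIn team (PySem.Str.upper home_team))
  let away_barca := barca_tier.any (fun team => PySem.Str.isIn team (PySem.Str.upper away_team))
  let home_real := real_tier.any (fun team => PySem.Str.isIn team (PySem.Str.upper home_team))
  let away_real := real_tier.any (fun team => PySem.Str.isIn team (PySem.Str.upper away_team))
  let home_elite := elite_tier.any (fun team => PySem.Str.isIn team (PySem.Str.upper home_team))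
  let away_elite := elite_tier.any (fun team => PySem.Str.isIn team (PySem.Str.upper away_team))
  let home_strong := strong_tier.any (fun team => PySem.Str.isIn team (PySem.Str.upper home_team))
  let away_strong := strong_tier.any (fun team => PySem.Str.isIn team (PySem.Str.upper away_team))
  if home_barca && !(away_barca || away_real) then home_team
  else if away_barca && !(home_barca || home_real) then away_team
  else if home_real && !(away_barca || away_real) then home_team
  else if away_real && !(home_barca || home_real) then away_team
  else if home_elite && !(away_elite || away_barca || away_real) then home_team
  else if away_elite && !(home_elite || home_barca || home_real) then away_team
  else if home_strong && !(away_strong || away_elite || away_barca || away_real) then home_team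
  else if away_strong && !(home_strong || home_elite || home_barca || home_real) then away_team
  else home_team

-- ===== PORT B =====
def pvTiersB : List (List String) :=
  [["BARCELONA", "BARCA", "FC BARCELONA", "REAL MADRID", "MADRID", "REAL"],
   ["ATLETICO MADRID"],
   ["SEVILLA", "ATHLETIC BILBAO", "REAL SOCIEDAD", "VILLARREAL"]]

def pvRankGoB (name : String) (i : Nat) : List (List String) → Nat
  | [] => i
  | tier :: rest => if tier.any (fun t => PySem.Str.isIn t name) then i else pvRankGoB name (i + 1) rest

def pvRankB (team : String) : Nat := pvRankGoB (PySem.Str.upper team) 0 pvTiersB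

def get_stronger_real_la_liga_team_py_alt (home_team : String) (away_team : String) : String :=
  if pvRankB away_team < pvRankB home_team then away_team else home_team

-- ===== PRECONDITION & SPEC =====
def Spec_get_stronger_real_la_liga_team_py (home_team : String) (away_team : String) (out : String) : Prop := out = get_stronger_real_la_liga_team_py_alt home_team away_team
instance (home_team : String) (away_team : String) (out : String) : Decidable (Spec_get_stronger_real_la_liga_team_py home_team away_team out) := by unfold Spec_get_stronger_real_la_liga_team_py; infer_instance

-- ===== CLAIM (what is proved, stated in full; the proofs are below) =====
def Claim_equal_get_stronger_real_la_liga_team_py : Prop := ∀ (home_team : String) (away_team : String), Dom_get_stronger_real_la_liga_team_py home_team away_team → Spec_get_stronger_real_la_liga_team_py home_team away_team (get_stronger_real_la_liga_team_py home_team away_team)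

-- ===== LEMMAS AND PROOFS =====
-- A's decision tree abstracted over its eight boolean flags (proof helper; not part of either port)
def pvTreeA (hb hr he hs ab ar ae as : Bool) (h a : String) : String :=
  if hb && !(ab || ar) then h
  else if ab && !(hb || hr) then a
  else if hr && !(ab || ar) then h
  else if ar && !(hb || hr) then a
  else if he && !(ae || ab || ar) then h
  else if ae && !(he || hb || hr) then a
  else if hs && !(as || ae || ab || ar) then h
  else if as && !(hs || he || hb || hr) then a
  else h

-- B's rank abstracted over the same flags
def pvRankBool (b r e s : Bool) : Nat :=
  if b || r then 0 else if e then 1 else if s then 2 else 3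

theorem pvTree_rank (hb hr he hs ab ar ae as : Bool) (h a : String) :
    pvTreeA hb hr he hs ab ar ae as h a =
      if pvRankBool ab ar ae as < pvRankBool hb hr he hs then a else h := by
  cases hb <;> cases hr <;> cases he <;> cases hs <;> cases ab <;> cases ar <;> cases ae <;> cases as <;>
    simp [pvTreeA, pvRankBool]

theorem pvRankB_eq (u : String) :
    pvRankGoB u 0 pvTiersB =
      pvRankBool ((["BARCELONA", "BARCA", "FC BARCELONA"] : List String).any (fun t => PySem.Str.isIn t u))
        ((["REAL MADRID", "MADRID", "REAL"] : List String).any (fun t => PySem.Str.isIn t u))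
        ((["ATLETICO MADRID"] : List String).any (fun t => PySem.Str.isIn t u))
        ((["SEVILLA", "ATHLETIC BILBAO", "REAL SOCIEDAD", "VILLARREAL"] : List String).any (fun t => PySem.Str.isIn t u)) := by
  simp only [pvTiersB, pvRankGoB, pvRankBool, List.any_cons, List.any_nil, Bool.or_false, Bool.or_assoc]

-- ===== VERDICT (by name: the statement is the Claim_ definition above) =====
theorem get_stronger_real_la_liga_team_py_spec : Claim_equal_get_stronger_real_la_liga_team_py := by
  intro home_team away_team _
  unfold Spec_get_stronger_real_la_liga_team_py
  show pvTreeA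
      ((["BARCELONA", "BARCA", "FC BARCELONA"] : List String).any (fun t => PySem.Str.isIn t (PySem.Str.upper home_team)))
      ((["REAL MADRID", "MADRID", "REAL"] : List String).any (fun t => PySem.Str.isIn t (PySem.Str.upper home_team)))
      ((["ATLETICO MADRID"] : List String).any (fun t => PySem.Str.isIn t (PySem.Str.upper home_team)))
      ((["SEVILLA", "ATHLETIC BILBAO", "REAL SOCIEDAD", "VILLARREAL"] : List String).any (fun t => PySem.Str.isIn t (PySem.Str.upper home_team)))
      ((["BARCELONA", "BARCA", "FC BARCELONA"] : List String).any (fun t => PySem.Str.isIn t (PySem.Str.upper away_team)))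
      ((["REAL MADRID", "MADRID", "REAL"] : List String).any (fun t => PySem.Str.isIn t (PySem.Str.upper away_team)))
      ((["ATLETICO MADRID"] : List String).any (fun t => PySem.Str.isIn t (PySem.Str.upper away_team)))
      ((["SEVILLA", "ATHLETIC BILBAO", "REAL SOCIEDAD", "VILLARREAL"] : List String).any (fun t => PySem.Str.isIn t (PySem.Str.upper away_team)))
      home_team away_team
    = get_stronger_real_la_liga_team_py_alt home_team away_team
  rw [pvTree_rank]
  unfold get_stronger_real_la_liga_team_py_alt pvRankB
  rw [pvRankB_eq, pvRankB_eq]
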